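-- pv_equiv track=rewrite | github.com/nej296/Impulse-Propagation-Simulator | app.py | _stim_intervals
-- ===== SOURCE A (Python) =====
-- def _stim_intervals(mask, t):
--     starts, ends, in_stim = [], [], False
--     for i, active in enumerate(mask):
--         if active and not in_stim:
--             starts.append(t[i]); in_stim = True
--         elif not active and in_stim:
--             ends.append(t[i]); in_stim = False
--     if in_stim:
--         ends.append(t[-1])
--     return starts, ends
-- ===== SOURCE B (Python) =====
-- def _stim_intervals(mask, t):
--     # phase 1: collect transition indices (edge positions) in one scan
--     transitions = []
--     prev = False
--     for i, active in enumerate(mask):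
--         if bool(active) != prev:
--             transitions.append(i)
--             prev = not prev
--     # phase 2: consume transitions pairwise: (start, end), (start, end), ...
--     starts, ends = [], []
--     k = 0
--     while k < len(transitions):
--         starts.append(t[transitions[k]])
--         ends.append(t[transitions[k + 1]] if k + 1 < len(transitions) else t[-1])
--         k += 2
--     return starts, ends
-- ===== Notes on version B (the rewrite author's own statement) =====
-- stated objective: alternative
-- what changed: Replaces A's single stateful scan with explicit start/end list bookkeeping by a two-phase algorithm: first collect all edge (transition) indices in one pass, then consume that list pairwise to emit (start, end) pairs, closing a trailing open interval with t[-1].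
import Mathlib
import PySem

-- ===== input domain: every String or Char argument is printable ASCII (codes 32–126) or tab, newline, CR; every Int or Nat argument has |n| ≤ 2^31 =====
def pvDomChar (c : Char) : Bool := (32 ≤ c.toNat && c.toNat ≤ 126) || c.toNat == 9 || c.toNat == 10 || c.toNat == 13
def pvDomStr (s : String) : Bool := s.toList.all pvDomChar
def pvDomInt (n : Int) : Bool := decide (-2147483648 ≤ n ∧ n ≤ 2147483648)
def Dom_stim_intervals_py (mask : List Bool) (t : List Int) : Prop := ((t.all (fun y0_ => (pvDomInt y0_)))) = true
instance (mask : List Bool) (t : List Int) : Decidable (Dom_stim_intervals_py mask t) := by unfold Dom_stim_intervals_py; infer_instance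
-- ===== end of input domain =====

-- B re-implements A's single stateful edge-detecting scan as two phases (collect transition
-- indices, then pair them up into starts/ends); same O(n) cost, different decomposition.
-- t[i] / t[-1] are ported with PySem.List.pyGet? defaulted to 0; Pre_ keeps indexing in range.

-- ===== PORT A =====
-- t[i] for a nonnegative loop index i (IndexError excluded by Pre_)
def pvTGet (t : List Int) (i : Nat) : Int := (PySem.List.pyGet? t (i : Int)).getD 0

def aLoop (t : List Int) (i : Nat) (starts ends : List Int) (in_stim : Bool) :
    List Bool → List Int × List Int × Bool
  | [] => (starts, ends, in_stim)
  | a :: rest =>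
    if a && !in_stim then aLoop t (i + 1) (starts ++ [pvTGet t i]) ends true rest
    else if !a && in_stim then aLoop t (i + 1) starts (ends ++ [pvTGet t i]) false rest
    else aLoop t (i + 1) starts ends in_stim rest

def stim_intervals_py (mask : List Bool) (t : List Int) : List Int × List Int :=
  let r := aLoop t 0 [] [] false mask
  (r.1, if r.2.2 then r.2.1 ++ [(PySem.List.pyGet? t (-1)).getD 0] else r.2.1)

-- ===== PORT B =====
-- phase 1: transition indices
def bTrans (i : Nat) (prev : Bool) : List Bool → List Nat
  | [] => []
  | a :: rest => if a != prev then i :: bTrans (i + 1) (!prev) rest else bTrans (i + 1) prev rest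

-- phase 2: consume transitions pairwise (the while-loop stepping k by 2)
def bPair (t : List Int) : List Nat → List Int × List Int
  | [] => ([], [])
  | [a] => ([pvTGet t a], [(PySem.List.pyGet? t (-1)).getD 0])
  | a :: b :: rest =>
    let r := bPair t rest
    (pvTGet t a :: r.1, pvTGet t b :: r.2)

def stim_intervals_py_alt (mask : List Bool) (t : List Int) : List Int × List Int :=
  bPair t (bTrans 0 false mask)

-- ===== PRECONDITION & SPEC =====
-- Pre_ admits exactly the inputs where Python A returns: A indexes t only at transition
-- positions of mask (and t[-1] only when mask ends active, forcing a transition), so A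
-- raises IndexError iff some transition index lies at or beyond len(t).
def Pre_stim_intervals_py (mask : List Bool) (t : List Int) : Prop :=
  ((List.range mask.length).all (fun i =>
    decide (i < t.length) ||
      (mask.getD i false == (if i = 0 then false else mask.getD (i - 1) false)))) = true
instance (mask : List Bool) (t : List Int) : Decidable (Pre_stim_intervals_py mask t) := by
  unfold Pre_stim_intervals_py; infer_instance

def pvWitness_stim_intervals_py : List Bool × List Int :=
  ([false, true, true, false], [10, 20, 30, 40])

def Spec_stim_intervals_py (mask : List Bool) (t : List Int) (out : List Int × List Int) : Prop := out = stim_intervals_py_alt mask t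
instance (mask : List Bool) (t : List Int) (out : List Int × List Int) : Decidable (Spec_stim_intervals_py mask t out) := by unfold Spec_stim_intervals_py; infer_instance

-- ===== CLAIM (what is proved, stated in full; the proofs are below) =====
def Claim_equal_stim_intervals_py : Prop := ∀ (mask : List Bool) (t : List Int), Dom_stim_intervals_py mask t → Pre_stim_intervals_py mask t → Spec_stim_intervals_py mask t (stim_intervals_py mask t)

-- ===== LEMMAS AND PROOFS =====
mutual
def pvEvens {α : Type} : List α → List α
  | [] => []
  | a :: r => a :: pvOdds r
def pvOdds {α : Type} : List α → List α
  | [] => []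
  | _ :: r => pvEvens r
end

-- the value of in_stim/prev after scanning mask, starting from prev
def pvLast (prev : Bool) (mask : List Bool) : Bool := mask.foldl (fun _ a => a) prev

theorem aLoop_char (t : List Int) (mask : List Bool) :
    ∀ (i : Nat) (prev : Bool) (starts ends : List Int),
    aLoop t i starts ends prev mask =
      (starts ++ (if prev then pvOdds (bTrans i prev mask) else pvEvens (bTrans i prev mask)).map (pvTGet t),
       ends ++ (if prev then pvEvens (bTrans i prev mask) else pvOdds (bTrans i prev mask)).map (pvTGet t),
       pvLast prev mask) := by
  induction mask with
  | nil => intro i prev starts ends; cases prev <;> simp [aLoop, bTrans, pvEvens, pvOdds, pvLast]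
  | cons a rest ih =>
    intro i prev starts ends
    cases a <;> cases prev <;>
      simp [aLoop, bTrans, pvEvens, pvOdds, ih, pvLast]

theorem bPair_char (t : List Int) : ∀ l : List Nat,
    bPair t l = ((pvEvens l).map (pvTGet t),
      (pvOdds l).map (pvTGet t) ++
        (if l.length % 2 = 1 then [(PySem.List.pyGet? t (-1)).getD 0] else [])) := by
  intro l
  induction l using bPair.induct t with
  | case1 => simp [bPair, pvEvens, pvOdds]
  | case2 a => simp [bPair, pvEvens, pvOdds]
  | case3 a b rest ih =>
    have h2 : (rest.length + 1 + 1) % 2 = rest.length % 2 := by omega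
    simp [bPair, pvEvens, pvOdds, ih, h2]

theorem bTrans_parity : ∀ (mask : List Bool) (i : Nat) (prev : Bool),
    (bTrans i prev mask).length % 2 = (if pvLast prev mask = prev then 0 else 1) := by
  intro mask
  induction mask with
  | nil => intro i prev; simp [bTrans, pvLast]
  | cons a rest ih =>
    intro i prev
    have hl : pvLast prev (a :: rest) = pvLast a rest := rfl
    rw [hl]
    cases a <;> cases prev
    · simpa [bTrans] using ih (i + 1) false
    · have h2 := ih (i + 1) false
      simp [bTrans]
      rcases h : pvLast false rest <;> simp [h] at h2 ⊢ <;> omega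
    · have h2 := ih (i + 1) true
      simp [bTrans]
      rcases h : pvLast true rest <;> simp [h] at h2 ⊢ <;> omega
    · simpa [bTrans] using ih (i + 1) true

-- ===== VERDICT (by name: the statement is the Claim_ definition above) =====
theorem stim_intervals_py_spec : Claim_equal_stim_intervals_py := by
  intro mask t _ _
  unfold Spec_stim_intervals_py stim_intervals_py stim_intervals_py_alt
  rw [aLoop_char, bPair_char, bTrans_parity]
  cases pvLast false mask <;> simp
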